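-- pv_equiv track=rewrite | github.com/JOC06/Practicas | 016.- Lógica de 1er Orden/Ing Conocimientos.py | recomendar_peliculas
-- ===== SOURCE A (Python) =====
-- def recomendar_peliculas(base_de_datos, preferencias, umbral=3):
--     recomendaciones = []
--     for pelicula, generos in base_de_datos.items():
--         puntaje = 0
--         for genero in generos:
--             if genero in preferencias:
--                 puntaje += preferencias[genero]
--         if puntaje >= umbral:
--             recomendaciones.append(pelicula)
--     return recomendaciones
-- ===== SOURCE B (Python) =====
-- def recomendar_peliculas(base_de_datos, preferencias, umbral=3):
--     # Inverted index: genre -> movies containing it (one entry per occurrence).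
--     indice = {}
--     for pelicula, generos in base_de_datos.items():
--         for genero in generos:
--             indice.setdefault(genero, []).append(pelicula)
--     puntajes = {pelicula: 0 for pelicula in base_de_datos}
--     for genero, peso in preferencias.items():
--         for pelicula in indice.get(genero, []):
--             puntajes[pelicula] += peso
--     return [pelicula for pelicula in base_de_datos if puntajes[pelicula] >= umbral]
-- ===== Notes on version B (the rewrite author's own statement) =====
-- stated objective: alternative
-- what changed: B replaces A's per-movie rescan of every genre against the preference dict by a two-phase algorithm: build an inverted genre-to-movies index and a scores dict initialised to 0, add each preference weight to all movies in that genre's bucket, then emit movies meeting the threshold in database order.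
import Mathlib
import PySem

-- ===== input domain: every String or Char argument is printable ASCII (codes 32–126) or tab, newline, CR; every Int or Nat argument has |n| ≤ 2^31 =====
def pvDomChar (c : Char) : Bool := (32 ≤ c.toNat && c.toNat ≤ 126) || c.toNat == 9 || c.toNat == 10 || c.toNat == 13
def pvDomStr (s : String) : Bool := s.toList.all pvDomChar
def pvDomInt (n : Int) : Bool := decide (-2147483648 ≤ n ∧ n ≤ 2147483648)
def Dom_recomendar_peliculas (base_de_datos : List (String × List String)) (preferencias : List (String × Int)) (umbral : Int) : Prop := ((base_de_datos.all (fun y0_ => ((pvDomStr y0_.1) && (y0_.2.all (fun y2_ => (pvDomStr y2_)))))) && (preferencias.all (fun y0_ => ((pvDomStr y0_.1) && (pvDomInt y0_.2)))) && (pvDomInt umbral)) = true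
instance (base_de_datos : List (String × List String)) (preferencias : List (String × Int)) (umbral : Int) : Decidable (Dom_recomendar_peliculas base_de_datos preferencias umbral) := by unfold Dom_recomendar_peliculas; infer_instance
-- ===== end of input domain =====

-- B replaces A's per-movie scan of each genre against the preference dict by an inverted
-- genre→movies index plus one scores dict updated per preference (objective: alternative).

-- ===== PORT A =====
def recomendar_peliculas (base_de_datos : List (String × List String)) (preferencias : List (String × Int)) (umbral : Int) : List String :=
  let prefsD : PySem.Dict String Int := PySem.Dict.mk preferencias
  base_de_datos.foldl (fun recomendaciones r =>
    let puntaje : Int := r.2.foldl (fun p genero =>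
      if prefsD.contains genero then p + prefsD.getD genero 0 else p) 0
    if umbral ≤ puntaje then recomendaciones ++ [r.1] else recomendaciones) []

-- ===== PORT B =====
def recomendar_peliculas_alt (base_de_datos : List (String × List String)) (preferencias : List (String × Int)) (umbral : Int) : List String :=
  let indice : PySem.Dict String (List String) :=
    base_de_datos.foldl (fun ix r =>
      r.2.foldl (fun ix genero => ix.modify genero [] (· ++ [r.1])) ix) PySem.Dict.empty
  let puntajes0 : PySem.Dict String Int :=
    base_de_datos.foldl (fun sc r => sc.insert r.1 0) PySem.Dict.empty
  let puntajes : PySem.Dict String Int :=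
    preferencias.foldl (fun sc e =>
      (indice.getD e.1 []).foldl (fun sc pelicula => sc.modify pelicula 0 (· + e.2)) sc) puntajes0
  base_de_datos.foldl (fun out r =>
    if umbral ≤ puntajes.getD r.1 0 then out ++ [r.1] else out) []

-- ===== PRECONDITION & SPEC =====
-- Pre_ requires both dicts to have pairwise-distinct keys: an association list with a duplicated
-- key does not represent any Python dict (dict construction overwrites), so nothing is excluded
-- that Python's A could ever be called on.
def Pre_recomendar_peliculas (base_de_datos : List (String × List String)) (preferencias : List (String × Int)) (umbral : Int) : Prop :=
  (base_de_datos.map Prod.fst).Nodup ∧ (preferencias.map Prod.fst).Nodup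
instance (base_de_datos : List (String × List String)) (preferencias : List (String × Int)) (umbral : Int) : Decidable (Pre_recomendar_peliculas base_de_datos preferencias umbral) := by unfold Pre_recomendar_peliculas; infer_instance

def pvWitness_recomendar_peliculas : (List (String × List String)) × (List (String × Int)) × Int :=
  ([("Matrix", ["accion", "scifi"]), ("Coco", ["drama"])], [("accion", 2), ("scifi", 1)], 3)

def Spec_recomendar_peliculas (base_de_datos : List (String × List String)) (preferencias : List (String × Int)) (umbral : Int) (out : List String) : Prop := out = recomendar_peliculas_alt base_de_datos preferencias umbral
instance (base_de_datos : List (String × List String)) (preferencias : List (String × Int)) (umbral : Int) (out : List String) : Decidable (Spec_recomendar_peliculas base_de_datos preferencias umbral out) := by unfold Spec_recomendar_peliculas; infer_instance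

-- ===== CLAIM (what is proved, stated in full; the proofs are below) =====
def Claim_equal_recomendar_peliculas : Prop := ∀ (base_de_datos : List (String × List String)) (preferencias : List (String × Int)) (umbral : Int), Dom_recomendar_peliculas base_de_datos preferencias umbral → Pre_recomendar_peliculas base_de_datos preferencias umbral → Spec_recomendar_peliculas base_de_datos preferencias umbral (recomendar_peliculas base_de_datos preferencias umbral)

-- ===== LEMMAS AND PROOFS =====

lemma pv_modify_add (ms : List String) (d : PySem.Dict String Int) (w : Int) (m : String) :
    (ms.foldl (fun d x => d.modify x 0 (· + w)) d).getD m 0 = d.getD m 0 + w * (ms.count m : Int) := by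
  induction ms generalizing d with
  | nil => simp
  | cons x t ih =>
    simp only [List.foldl_cons, ih, PySem.Dict.getD_modify, List.count_cons]
    by_cases h : m = x
    · simp [h]; ring
    · simp [h, Ne.symm h]

lemma pv_phase2 (prefs : List (String × Int)) (bucket : String → List String)
    (sc : PySem.Dict String Int) (m : String) :
    (prefs.foldl (fun sc e => (bucket e.1).foldl (fun sc p => sc.modify p 0 (· + e.2)) sc) sc).getD m 0
      = sc.getD m 0 + (prefs.map (fun e => e.2 * ((bucket e.1).count m : Int))).sum := by
  induction prefs generalizing sc with
  | nil => simp
  | cons e t ih =>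
    simp only [List.foldl_cons, ih, pv_modify_add, List.map_cons, List.sum_cons]
    ring

lemma pv_init (db : List (String × List String)) (sc : PySem.Dict String Int) (m : String)
    (h : sc.getD m 0 = 0) :
    (db.foldl (fun sc r => sc.insert r.1 0) sc).getD m 0 = 0 := by
  induction db generalizing sc with
  | nil => simpa using h
  | cons r t ih =>
    simp only [List.foldl_cons]
    exact ih _ (by simp [PySem.Dict.getD_insert, h])

lemma pv_bucket (db : List (String × List String)) (ix : PySem.Dict String (List String)) (g : String) :
    (db.foldl (fun ix r => r.2.foldl (fun ix genero => ix.modify genero [] (· ++ [r.1])) ix) ix).getD g []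
      = ix.getD g [] ++ db.flatMap (fun r => List.replicate (r.2.count g) r.1) := by
  induction db generalizing ix with
  | nil => simp
  | cons r t ih =>
    simp only [List.foldl_cons, ih, List.flatMap_cons, ← List.append_assoc]
    congr 1
    have h1 : r.2.foldl (fun ix genero => ix.modify genero [] (· ++ [r.1])) ix
        = (r.2.map (fun g' => (g', r.1))).foldl (fun ix q => ix.modify q.1 [] (· ++ [q.2])) ix := by
      simp [List.foldl_map]
    rw [h1, PySem.Dict.getD_foldl_modify_append]
    congr 1
    rw [List.filter_map]
    simp only [List.map_map, Function.comp_def]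
    rw [List.map_const', List.count_eq_length_filter]

lemma pv_flat_count_zero (db : List (String × List String)) (g m : String)
    (h : ∀ r ∈ db, r.1 ≠ m) :
    (db.flatMap (fun r => List.replicate (r.2.count g) r.1)).count m = 0 := by
  induction db with
  | nil => simp
  | cons r t ih =>
    simp only [List.flatMap_cons, List.count_append, ih (fun x hx => h x (List.mem_cons_of_mem _ hx))]
    have hr := h r (List.mem_cons_self)
    simp [List.count_replicate, hr]

lemma pv_flat_count (db : List (String × List String)) (g m : String) (gs : List String)
    (hnd : (db.map Prod.fst).Nodup) (hmem : (m, gs) ∈ db) :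
    (db.flatMap (fun r => List.replicate (r.2.count g) r.1)).count m = gs.count g := by
  induction db with
  | nil => simp at hmem
  | cons r t ih =>
    simp only [List.map_cons, List.nodup_cons] at hnd
    rcases List.mem_cons.mp hmem with h | h
    · subst h
      simp only [List.flatMap_cons, List.count_append, List.count_replicate]
      have : (t.flatMap (fun r => List.replicate (r.2.count g) r.1)).count m = 0 :=
        pv_flat_count_zero t g m (fun x hx hx1 => hnd.1 (List.mem_map.mpr ⟨x, hx, hx1⟩))
      simp [this]
    · have hr : r.1 ≠ m := fun he => hnd.1 (by rw [he]; exact List.mem_map_of_mem (f := Prod.fst) h)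
      simp [List.count_replicate, hr, ih hnd.2 h]

lemma pv_lookup_sum (prefs : List (String × Int)) (x : String)
    (hnd : (prefs.map Prod.fst).Nodup) :
    (prefs.map (fun e => if e.1 == x then e.2 else (0:Int))).sum = (PySem.Dict.mk prefs).getD x 0 := by
  induction prefs with
  | nil => simp [PySem.Dict.getD_eq_get?_getD, show PySem.Dict.mk ([] : List (String × Int)) = PySem.Dict.empty from rfl]
  | cons e t ih =>
    simp only [List.map_cons, List.nodup_cons] at hnd
    simp only [List.map_cons, List.sum_cons]
    rw [PySem.Dict.getD_eq_get?_getD, PySem.Dict.get?_mk_cons]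
    by_cases h : e.1 = x
    · subst h
      have hz : (t.map (fun e' => if e'.1 == e.1 then e'.2 else (0:Int))).sum = 0 := by
        have hall : ∀ e' ∈ t, (if e'.1 == e.1 then e'.2 else (0:Int)) = 0 := by
          intro e' he'
          have : e'.1 ≠ e.1 := fun hx => hnd.1 (hx ▸ List.mem_map_of_mem (f := Prod.fst) he')
          simp [this]
        rw [List.map_congr_left hall]
        simp
      simp
      simpa using hz
    · have hb : (e.1 == x) = false := by simp [h]
      simp only [hb, Bool.false_eq_true, if_false]
      rw [← PySem.Dict.getD_eq_get?_getD, ih hnd.2]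
      simp

lemma pv_exchange (prefs : List (String × Int)) (gs : List String)
    (hnd : (prefs.map Prod.fst).Nodup) :
    (gs.map (fun g => (PySem.Dict.mk prefs).getD g 0)).sum
      = (prefs.map (fun e => e.2 * (gs.count e.1 : Int))).sum := by
  induction gs with
  | nil => simp
  | cons x t ih =>
    simp only [List.map_cons, List.sum_cons, ih]
    have : ∀ e : String × Int, e.2 * (((x :: t).count e.1 : Nat) : Int)
        = (if e.1 == x then e.2 else 0) + e.2 * ((t.count e.1 : Nat) : Int) := by
      intro e
      by_cases h : e.1 = x
      · simp [h, List.count_cons_self]; ring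
      · simp [h]
        exact Or.inl (List.count_cons_of_ne (Ne.symm h))
    calc ((PySem.Dict.mk prefs).getD x 0) + (prefs.map (fun e => e.2 * ((t.count e.1 : Nat) : Int))).sum
        = (prefs.map (fun e => if e.1 == x then e.2 else (0:Int))).sum
          + (prefs.map (fun e => e.2 * ((t.count e.1 : Nat) : Int))).sum := by rw [pv_lookup_sum prefs x hnd]
      _ = (prefs.map (fun e => (if e.1 == x then e.2 else (0:Int)) + e.2 * ((t.count e.1 : Nat) : Int))).sum := by
          rw [← List.sum_map_add]
      _ = (prefs.map (fun e => e.2 * (((x :: t).count e.1 : Nat) : Int))).sum := by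
          exact (List.map_congr_left (fun e _ => (this e).symm)) ▸ rfl

lemma pv_scoreA (prefs : List (String × Int)) (gs : List String) :
    gs.foldl (fun p g => if (PySem.Dict.mk prefs).contains g then p + (PySem.Dict.mk prefs).getD g 0 else p) (0:Int)
      = (gs.map (fun g => (PySem.Dict.mk prefs).getD g 0)).sum := by
  have h := PySem.List.foldl_congr_mem (l := gs) (init := (0:Int))
      (f := fun p g => if (PySem.Dict.mk prefs).contains g then p + (PySem.Dict.mk prefs).getD g 0 else p)
      (g := fun p g => p + (PySem.Dict.mk prefs).getD g 0)
      (by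
        intro acc x _
        by_cases h : (PySem.Dict.mk prefs).contains x
        · simp [h]
        · have hcf : (PySem.Dict.mk prefs).contains x = false := by
            cases hc2 : (PySem.Dict.mk prefs).contains x
            · rfl
            · exact absurd hc2 h
          have h0 : (PySem.Dict.mk prefs).getD x 0 = 0 :=
            PySem.Dict.getD_of_not_contains _ 0 hcf
          simp [hcf, h0])
  rw [h, PySem.List.foldl_add]
  simp

-- ===== VERDICT (by name: the statement is the Claim_ definition above) =====
theorem recomendar_peliculas_spec : Claim_equal_recomendar_peliculas := by
  intro db prefs umbral _hDom hPre
  obtain ⟨hdb, hpf⟩ := hPre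
  unfold Spec_recomendar_peliculas recomendar_peliculas recomendar_peliculas_alt
  rw [PySem.List.foldl_append_ite
        (p := fun r : String × List String => umbral ≤ r.2.foldl
          (fun p genero => if (PySem.Dict.mk prefs).contains genero then p + (PySem.Dict.mk prefs).getD genero 0 else p) 0)
        (f := fun r : String × List String => r.1),
      PySem.List.foldl_append_ite
        (p := fun r : String × List String => umbral ≤
          (prefs.foldl (fun sc e =>
            ((db.foldl (fun ix r => r.2.foldl (fun ix genero => ix.modify genero [] (· ++ [r.1])) ix) PySem.Dict.empty).getD e.1 []).foldl
              (fun sc pelicula => sc.modify pelicula 0 (· + e.2)) sc)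
            (db.foldl (fun sc r => sc.insert r.1 0) PySem.Dict.empty)).getD r.1 0)
        (f := fun r : String × List String => r.1)]
  congr 1
  congr 1
  apply List.filter_congr
  intro r hr
  have hb : ∀ g, (db.foldl (fun ix r => r.2.foldl (fun ix genero => ix.modify genero [] (· ++ [r.1])) ix) PySem.Dict.empty).getD g []
      = db.flatMap (fun r => List.replicate (r.2.count g) r.1) := by
    intro g
    rw [pv_bucket]
    simp
  have hc : ∀ e : String × Int,
      e.2 * (((db.foldl (fun ix r => r.2.foldl (fun ix genero => ix.modify genero [] (· ++ [r.1])) ix) PySem.Dict.empty).getD e.1 []).count r.1 : Int)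
        = e.2 * (r.2.count e.1 : Int) := by
    intro e
    rw [hb e.1, pv_flat_count db e.1 r.1 r.2 hdb (by simpa using hr)]
  have hscore :
      (prefs.foldl (fun sc e =>
          ((db.foldl (fun ix r => r.2.foldl (fun ix genero => ix.modify genero [] (· ++ [r.1])) ix) PySem.Dict.empty).getD e.1 []).foldl
            (fun sc pelicula => sc.modify pelicula 0 (· + e.2)) sc)
        (db.foldl (fun sc r => sc.insert r.1 0) PySem.Dict.empty)).getD r.1 0
      = r.2.foldl (fun p genero => if (PySem.Dict.mk prefs).contains genero then p + (PySem.Dict.mk prefs).getD genero 0 else p) (0:Int) := by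
    rw [pv_phase2 prefs (fun g => (db.foldl (fun ix r => r.2.foldl (fun ix genero => ix.modify genero [] (· ++ [r.1])) ix) PySem.Dict.empty).getD g [])]
    rw [pv_init db _ r.1 (by simp)]
    rw [List.map_congr_left (fun e _ => hc e)]
    rw [pv_scoreA, pv_exchange prefs r.2 hpf]
    simp
  rw [hscore]
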